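-- pv_equiv track=rewrite | github.com/jacimov/Statistical-Computing | crowded_cows.py | find_crowded
-- ===== SOURCE A (Python) =====
-- def find_crowded(cows, k):
--     """Find highest breed ID of cows within k positions of each other"""
--     if len(cows) < 2:
--         return -1
--
--     pos = {}
--     crowded = set()
--
--     for i, breed in enumerate(cows):
--         if breed in pos:
--             if i - pos[breed][-1] <= k:
--                 crowded.add(breed)
--             pos[breed].append(i)
--         else:
--             pos[breed] = [i]
--
--     return max(crowded) if crowded else -1
-- ===== SOURCE B (Python) =====
-- def find_crowded(cows, k):
--     """Find highest breed ID of cows within k positions of each other"""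
--     if len(cows) < 2:
--         return -1
--
--     pos = {}
--     for i, breed in enumerate(cows):
--         pos.setdefault(breed, []).append(i)
--
--     crowded = set()
--     for breed, ps in pos.items():
--         if any(b - a <= k for a, b in zip(ps, ps[1:])):
--             crowded.add(breed)
--
--     return max(crowded) if crowded else -1
-- ===== Notes on version B (the rewrite author's own statement) =====
-- stated objective: alternative
-- what changed: A's single interleaved pass (dict of positions plus on-the-fly crowded checks) is replaced by a two-phase decomposition: one pass builds a breed-to-positions index, then a group-shaped scan over each breed's position list looks for an adjacent gap <= k, finally max over the crowded set.
import Mathlib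
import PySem

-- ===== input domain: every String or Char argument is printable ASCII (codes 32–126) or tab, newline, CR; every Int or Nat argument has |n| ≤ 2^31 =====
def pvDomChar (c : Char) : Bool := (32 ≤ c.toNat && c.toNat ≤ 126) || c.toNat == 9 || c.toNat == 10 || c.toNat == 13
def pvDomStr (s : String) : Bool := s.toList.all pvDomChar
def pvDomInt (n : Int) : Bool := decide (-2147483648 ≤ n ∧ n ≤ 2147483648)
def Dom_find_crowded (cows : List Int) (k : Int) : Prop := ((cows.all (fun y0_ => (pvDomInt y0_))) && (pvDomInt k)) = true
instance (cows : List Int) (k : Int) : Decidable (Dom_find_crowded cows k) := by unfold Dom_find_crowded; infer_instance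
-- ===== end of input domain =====

-- B replaces A's single interleaved pass by a two-phase decomposition (build a breed→positions
-- index, then scan each breed's position list for an adjacent gap ≤ k); same cost, alternative structure.

-- ===== PORT A =====
-- A: one pass over enumerate(cows); pos maps breed to its positions so far, crowded collects
-- breeds whose new occurrence is within k of the previous one.
def find_crowded (cows : List Int) (k : Int) : Int :=
  if PySem.List.len cows < 2 then -1
  else
    let st := (PySem.List.enumerate cows).foldl
      (fun (st : PySem.Dict Int (List Int) × PySem.Set Int) p =>
        let pos := st.1
        let crowded := st.2
        let i := p.1
        let breed := p.2
        if pos.contains breed then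
          let ps := pos.getD breed []   -- pos[breed]; the key is present, so no KeyError
          -- ps[-1]: ps is never [] here (only nonempty lists are stored), so the default is unread
          let crowded' := if i - PySem.List.pyGetD ps (-1) 0 ≤ k then PySem.Set.add crowded breed else crowded
          (pos.insert breed (ps ++ [i]), crowded')
        else
          (pos.insert breed [i], crowded))
      (PySem.Dict.empty, PySem.Set.empty)
    match PySem.List.max? st.2 (fun x => x) with
    | some m => m
    | none => -1

-- ===== PORT B =====
-- any(b - a <= k for a, b in zip(ps, ps[1:]))
def hasCloseB (k : Int) (ps : List Int) : Bool :=
  (ps.zip ps.tail).any (fun p => decide (p.2 - p.1 ≤ k))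

def find_crowded_alt (cows : List Int) (k : Int) : Int :=
  if PySem.List.len cows < 2 then -1
  else
    -- phase one: breed → list of all its positions (pos.setdefault(breed, []).append(i))
    let pos := (PySem.List.enumerate cows).foldl
      (fun (pos : PySem.Dict Int (List Int)) p => pos.modify p.2 [] (· ++ [p.1]))
      PySem.Dict.empty
    -- phase two: group-shaped scan of each breed's position list
    let crowded := pos.items.foldl
      (fun (s : PySem.Set Int) bp => if hasCloseB k bp.2 then PySem.Set.add s bp.1 else s)
      PySem.Set.empty
    match PySem.List.max? crowded (fun x => x) with
    | some m => m
    | none => -1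

-- ===== PRECONDITION & SPEC =====
def Spec_find_crowded (cows : List Int) (k : Int) (out : Int) : Prop := out = find_crowded_alt cows k
instance (cows : List Int) (k : Int) (out : Int) : Decidable (Spec_find_crowded cows k out) := by unfold Spec_find_crowded; infer_instance

-- ===== CLAIM (what is proved, stated in full; the proofs are below) =====
def Claim_equal_find_crowded : Prop := ∀ (cows : List Int) (k : Int), Dom_find_crowded cows k → Spec_find_crowded cows k (find_crowded cows k)

-- ===== LEMMAS AND PROOFS =====

-- proof helpers: the two fold bodies, named (definitionally equal to the ports' lambdas)
def stepA (k : Int) (st : PySem.Dict Int (List Int) × PySem.Set Int) (p : Int × Int) :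
    PySem.Dict Int (List Int) × PySem.Set Int :=
  let pos := st.1
  let crowded := st.2
  let i := p.1
  let breed := p.2
  if pos.contains breed then
    let ps := pos.getD breed []
    let crowded' := if i - PySem.List.pyGetD ps (-1) 0 ≤ k then PySem.Set.add crowded breed else crowded
    (pos.insert breed (ps ++ [i]), crowded')
  else
    (pos.insert breed [i], crowded)

def stepB (pos : PySem.Dict Int (List Int)) (p : Int × Int) : PySem.Dict Int (List Int) :=
  pos.modify p.2 [] (· ++ [p.1])

theorem hasCloseB_cons_cons (k a b : Int) (t : List Int) :
    hasCloseB k (a :: b :: t) = (decide (b - a ≤ k) || hasCloseB k (b :: t)) := by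
  simp [hasCloseB]

theorem hasCloseB_snoc (k i : Int) (ps : List Int) :
    hasCloseB k (ps ++ [i]) =
      (hasCloseB k ps || (match ps.getLast? with
        | some a => decide (i - a ≤ k)
        | none => false)) := by
  induction ps with
  | nil => simp [hasCloseB]
  | cons a t ih =>
    cases t with
    | nil => simp [hasCloseB]
    | cons b t' =>
      rw [List.cons_append, List.cons_append, hasCloseB_cons_cons, ← List.cons_append,
        hasCloseB_cons_cons, ih]
      simp [Bool.or_assoc]

theorem hasCloseB_snoc_snoc (k i a : Int) (qs : List Int) :
    hasCloseB k ((qs ++ [a]) ++ [i]) = (hasCloseB k (qs ++ [a]) || decide (i - a ≤ k)) := by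
  rw [hasCloseB_snoc]; simp

theorem A_fold_inv (k : Int) (l : List (Int × Int)) (pos : PySem.Dict Int (List Int))
    (crowded : PySem.Set Int)
    (hmem : ∀ b, (b ∈ crowded) ↔ hasCloseB k (pos.getD b []) = true)
    (hne : ∀ b, pos.contains b = true → pos.getD b [] ≠ []) :
    (l.foldl (stepA k) (pos, crowded)).1 = l.foldl stepB pos
    ∧ (∀ b, b ∈ (l.foldl (stepA k) (pos, crowded)).2 ↔
        hasCloseB k ((l.foldl stepB pos).getD b []) = true) := by
  induction l generalizing pos crowded with
  | nil => exact ⟨rfl, hmem⟩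
  | cons p t ih =>
    obtain ⟨i, breed⟩ := p
    simp only [List.foldl_cons]
    by_cases hc : pos.contains breed = true
    · -- existing breed: ps nonempty, split as qs ++ [a]
      have hps : pos.getD breed [] ≠ [] := hne breed hc
      obtain ⟨qs, a, hqa⟩ := (pos.getD breed []).eq_nil_or_concat.resolve_left hps
      have hstep : stepA k (pos, crowded) (i, breed) =
          (pos.insert breed (pos.getD breed [] ++ [i]),
            if i - a ≤ k then PySem.Set.add crowded breed else crowded) := by
        simp only [stepA, hc, if_true, hqa, List.concat_eq_append,
          PySem.List.pyGetD_neg_one_append_singleton]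
      have hstepB : stepB pos (i, breed) = pos.insert breed (pos.getD breed [] ++ [i]) := rfl
      rw [hstep, hstepB]
      apply ih
      · intro b
        rw [PySem.Dict.getD_insert]
        by_cases hb : b = breed
        · subst hb
          rw [if_pos rfl, hqa, List.concat_eq_append, hasCloseB_snoc_snoc]
          by_cases hik : i - a ≤ k
          · simp [hik, PySem.Set.mem_add]
          · simp [hik, hmem b, hqa]
        · rw [if_neg hb]
          by_cases hik : i - a ≤ k
          · simp only [hik, if_true, PySem.Set.mem_add, hmem b]
            constructor
            · rintro (h | h)
              · exact h
              · exact absurd h hb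
            · intro h; exact Or.inl h
          · simp only [hik, if_false]; exact hmem b
      · intro b hb
        by_cases hbb : b = breed
        · subst hbb; rw [PySem.Dict.getD_insert, if_pos rfl]; simp
        · rw [PySem.Dict.getD_insert, if_neg hbb]
          rw [PySem.Dict.contains_insert] at hb
          apply hne
          rcases Bool.or_eq_true_iff.mp hb with h | h
          · exact absurd (by simpa using h) hbb
          · exact h
    · -- new breed
      have hc' : pos.contains breed = false := by simpa using hc
      have hge : pos.getD breed [] = [] := PySem.Dict.getD_of_not_contains pos [] hc'
      have hstep : stepA k (pos, crowded) (i, breed) = (pos.insert breed [i], crowded) := by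
        simp only [stepA, hc', Bool.false_eq_true, if_false]
      have hstepB : stepB pos (i, breed) = pos.insert breed [i] := by
        show pos.insert breed (pos.getD breed [] ++ [i]) = _
        rw [hge]; rfl
      rw [hstep, hstepB]
      apply ih
      · intro b
        rw [PySem.Dict.getD_insert]
        by_cases hb : b = breed
        · subst hb
          rw [if_pos rfl, hmem b, hge]
          simp [hasCloseB]
        · rw [if_neg hb]; exact hmem b
      · intro b hb
        by_cases hbb : b = breed
        · subst hbb; rw [PySem.Dict.getD_insert, if_pos rfl]; simp
        · rw [PySem.Dict.getD_insert, if_neg hbb]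
          rw [PySem.Dict.contains_insert] at hb
          apply hne
          rcases Bool.or_eq_true_iff.mp hb with h | h
          · exact absurd (by simpa using h) hbb
          · exact h

theorem B_crowded_mem (k : Int) (items : List (Int × List Int)) (s : PySem.Set Int) (b : Int) :
    b ∈ items.foldl (fun (s : PySem.Set Int) bp => if hasCloseB k bp.2 then PySem.Set.add s bp.1 else s) s ↔
      b ∈ s ∨ ∃ ps, (b, ps) ∈ items ∧ hasCloseB k ps = true := by
  induction items generalizing s with
  | nil => simp
  | cons p t ih =>
    obtain ⟨c, ps⟩ := p
    simp only [List.foldl_cons, List.mem_cons]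
    rw [ih]
    by_cases h : hasCloseB k ps = true
    · simp only [h, if_true, PySem.Set.mem_add]
      constructor
      · rintro (⟨hs | hbc⟩ | ⟨qs, hq, hcq⟩)
        · exact Or.inl hs
        · exact Or.inr ⟨ps, Or.inl (by rw [hbc]), h⟩
        · exact Or.inr ⟨qs, Or.inr hq, hcq⟩
      · rintro (hs | ⟨qs, (hq | hq), hcq⟩)
        · exact Or.inl (Or.inl hs)
        · exact Or.inl (Or.inr (congrArg Prod.fst hq))
        · exact Or.inr ⟨qs, hq, hcq⟩
    · simp only [h]
      constructor
      · rintro (hs | ⟨qs, hq, hcq⟩)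
        · exact Or.inl hs
        · exact Or.inr ⟨qs, Or.inr hq, hcq⟩
      · rintro (hs | ⟨qs, (hq | hq), hcq⟩)
        · exact Or.inl hs
        · exact absurd (by have h2 : qs = ps := congrArg Prod.snd hq; rwa [h2] at hcq) h
        · exact Or.inr ⟨qs, hq, hcq⟩

theorem maxOr_congr (l1 l2 : List Int) (h : ∀ x, x ∈ l1 ↔ x ∈ l2) :
    (match PySem.List.max? l1 (fun x => x) with | some m => m | none => -1)
      = (match PySem.List.max? l2 (fun x => x) with | some m => m | none => -1) := by
  cases h1 : PySem.List.max? l1 (fun x => x) with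
  | none =>
    cases h2 : PySem.List.max? l2 (fun x => x) with
    | none => rfl
    | some m =>
      have hm := PySem.List.max?_mem h2
      rw [PySem.List.max?_eq_none_iff] at h1
      exact absurd ((h m).mpr hm) (by simp [h1])
  | some m =>
    cases h2 : PySem.List.max? l2 (fun x => x) with
    | none =>
      have hm := PySem.List.max?_mem h1
      rw [PySem.List.max?_eq_none_iff] at h2
      exact absurd ((h m).mp hm) (by simp [h2])
    | some m' =>
      have hm := PySem.List.max?_mem h1
      have hm' := PySem.List.max?_mem h2
      have h1' := PySem.List.max?_isMax h1
      have h2' := PySem.List.max?_isMax h2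
      exact le_antisymm (h2' m ((h m).mp hm)) (h1' m' ((h m').mpr hm'))


-- ===== VERDICT (by name: the statement is the Claim_ definition above) =====
theorem find_crowded_spec : Claim_equal_find_crowded := by
  intro cows k _
  show find_crowded cows k = find_crowded_alt cows k
  rw [show find_crowded cows k =
      (if PySem.List.len cows < 2 then (-1 : Int) else
        match PySem.List.max?
            ((PySem.List.enumerate cows).foldl (stepA k) (PySem.Dict.empty, PySem.Set.empty)).2
            (fun x => x) with
        | some m => m | none => -1) from rfl]
  rw [show find_crowded_alt cows k =
      (if PySem.List.len cows < 2 then (-1 : Int) else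
        match PySem.List.max?
            (((PySem.List.enumerate cows).foldl stepB PySem.Dict.empty).items.foldl
              (fun (s : PySem.Set Int) bp => if hasCloseB k bp.2 then PySem.Set.add s bp.1 else s)
              PySem.Set.empty)
            (fun x => x) with
        | some m => m | none => -1) from rfl]
  by_cases hlen : PySem.List.len cows < 2
  · rw [if_pos hlen, if_pos hlen]
  · rw [if_neg hlen, if_neg hlen]
    have hinv := A_fold_inv k (PySem.List.enumerate cows) PySem.Dict.empty PySem.Set.empty
      (by intro b; simp [PySem.Set.empty, PySem.Dict.getD_empty, hasCloseB])
      (by intro b hb; rw [PySem.Dict.contains_empty] at hb; exact absurd hb (by simp))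
    set posB := (PySem.List.enumerate cows).foldl stepB PySem.Dict.empty with hposB
    have hnodup : posB.keys.Nodup := by
      rw [hposB]
      exact PySem.Dict.nodup_keys_foldl_modify_key (PySem.List.enumerate cows) Prod.snd []
        (fun _ p => (· ++ [p.1])) PySem.Dict.empty (by simp [PySem.Dict.keys_empty])
    apply maxOr_congr
    intro b
    rw [hinv.2 b, B_crowded_mem k posB.items PySem.Set.empty b]
    simp only [PySem.Set.empty, List.not_mem_nil, false_or]
    constructor
    · intro hcl
      have hgne : posB.getD b [] ≠ [] := by
        intro hnil; rw [hnil] at hcl; simp [hasCloseB] at hcl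
      have hct : posB.contains b = true := by
        by_contra hcf
        exact hgne (PySem.Dict.getD_of_not_contains posB [] (by simpa using hcf))
      have hsome : (posB.get? b).isSome := by
        rw [← PySem.Dict.contains_eq_isSome_get?]; exact hct
      obtain ⟨ps, hps⟩ := Option.isSome_iff_exists.mp hsome
      refine ⟨ps, PySem.Dict.mem_items_of_get?_eq_some posB hps, ?_⟩
      rwa [PySem.Dict.getD_of_get?_eq_some posB [] hps] at hcl
    · rintro ⟨ps, hmem, hcl⟩
      rwa [PySem.Dict.getD_of_mem_items posB hmem hnodup]
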